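-- pv_equiv track=rewrite | github.com/mhewDai/112 | hw/hw2/hw2.py | multiCarrylessAdd
-- ===== SOURCE A (Python) =====
-- def digitCount(n):
--     count = 0
--     n = abs(n)
--     if (n == 0):
--         return 1
--     while (n > 0):
--         n //= 10
--         count += 1
--     return count
--
-- def carrylessAdd(x1, x2):
--     if (x2 > x1):
--         x1,x2 = x2,x1
--     sum = 0
--     result = 0
--     digits = digitCount(x1)
--     for i in range(0,digits):
--         sum = (x1%10+x2%10)%10
--         result += sum*10**i
--         x1 //= 10
--         x2 //= 10
--     return result
--
-- def multiCarrylessAdd(n):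
--     x1 = 140
--     lastDigit = n%10
--     result = 0
--     while (lastDigit>0):
--             result = carrylessAdd(result,x1)
--             lastDigit -= 1
--     return result
-- ===== SOURCE B (Python) =====
-- def multiCarrylessAdd(n):
--     # Closed form: carryless-adding 140 k times (k = n % 10) scales each digit of 140 mod 10.
--     k = n % 10
--     return (4 * k % 10) * 10 + (k % 10) * 100
-- ===== Notes on version B (the rewrite author's own statement) =====
-- stated objective: simpler
-- what changed: Replaces the repeated carrylessAdd loop (with its digitCount and per-digit inner loop) by a closed form: k = n % 10 and the result is (4*k % 10)*10 + (k % 10)*100, since carryless addition of 140 to itself k times multiplies each digit of 140 mod 10.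
import Mathlib
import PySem

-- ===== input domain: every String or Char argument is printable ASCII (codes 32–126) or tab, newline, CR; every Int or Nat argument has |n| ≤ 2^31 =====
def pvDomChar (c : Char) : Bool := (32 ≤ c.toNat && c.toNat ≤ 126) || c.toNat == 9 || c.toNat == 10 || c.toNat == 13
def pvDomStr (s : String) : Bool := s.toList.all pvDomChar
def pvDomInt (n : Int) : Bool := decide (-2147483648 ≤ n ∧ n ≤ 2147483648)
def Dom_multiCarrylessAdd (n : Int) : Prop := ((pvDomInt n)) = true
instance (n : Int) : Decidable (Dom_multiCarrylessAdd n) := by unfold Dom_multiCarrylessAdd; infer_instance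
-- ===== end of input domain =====

-- B replaces A's repeated-carrylessAdd loop by a closed form in k = n % 10 (objective: simpler).

-- ===== PORT A =====
-- helper digitCount: the 'while n > 0' loop is ported with an explicit fuel (n.toNat steps
-- always suffice, since n // 10 < n while n > 0); same state (n, count) as the Python loop.
def digitCountLoop (fuel : Nat) (n count : Int) : Int :=
  match fuel with
  | 0 => count
  | fuel + 1 =>
    if n > 0 then digitCountLoop fuel (PySem.Int.floordiv n 10) (count + 1) else count

def digitCount (n : Int) : Int :=
  let n' := |n|
  if n' = 0 then 1 else digitCountLoop n'.toNat n' 0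

-- carrylessAdd: swap, then the for-loop over range(0, digits) carried as a fold over the state
def carrylessAdd (x1 x2 : Int) : Int :=
  let (x1, x2) := if x2 > x1 then (x2, x1) else (x1, x2)
  let digits := digitCount x1
  let st := (PySem.List.pyRange 0 digits 1).foldl
    (fun (st : Int × Int × Int × Int) i =>
      let (_, result, x1, x2) := st
      let sum := PySem.Int.mod (PySem.Int.mod x1 10 + PySem.Int.mod x2 10) 10
      (sum, result + sum * 10 ^ i.toNat, PySem.Int.floordiv x1 10, PySem.Int.floordiv x2 10))
    (0, 0, x1, x2)
  st.2.1

-- the 'while lastDigit > 0' loop: lastDigit decreases by 1 each pass, so lastDigit.toNat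
-- steps of fuel are exactly enough
def multiLoop (fuel : Nat) (result lastDigit : Int) : Int :=
  match fuel with
  | 0 => result
  | fuel + 1 =>
    if lastDigit > 0 then multiLoop fuel (carrylessAdd result 140) (lastDigit - 1) else result

def multiCarrylessAdd (n : Int) : Int :=
  let lastDigit := PySem.Int.mod n 10
  multiLoop lastDigit.toNat 0 lastDigit

-- ===== PORT B =====
def multiCarrylessAdd_alt (n : Int) : Int :=
  let k := PySem.Int.mod n 10
  PySem.Int.mod (4 * k) 10 * 10 + PySem.Int.mod k 10 * 100

-- ===== PRECONDITION & SPEC =====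
def Spec_multiCarrylessAdd (n : Int) (out : Int) : Prop := out = multiCarrylessAdd_alt n
instance (n : Int) (out : Int) : Decidable (Spec_multiCarrylessAdd n out) := by unfold Spec_multiCarrylessAdd; infer_instance

-- ===== CLAIM (what is proved, stated in full; the proofs are below) =====
def Claim_equal_multiCarrylessAdd : Prop := ∀ (n : Int), Dom_multiCarrylessAdd n → Spec_multiCarrylessAdd n (multiCarrylessAdd n)

-- ===== LEMMAS AND PROOFS =====
-- Both sides depend on n only through k = n % 10, and 0 ≤ k < 10: ten closed cases suffice.
theorem multiCarrylessAdd_key (n : Int) :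
    multiCarrylessAdd n = multiCarrylessAdd_alt n := by
  have hmod : PySem.Int.mod n 10 = n % 10 := PySem.Int.mod_eq_emod_of_pos (by omega)
  have h0 : 0 ≤ n % 10 := Int.emod_nonneg n (by omega)
  have h1 : n % 10 < 10 := Int.emod_lt_of_pos n (by omega)
  unfold multiCarrylessAdd multiCarrylessAdd_alt
  rw [hmod]
  set k := n % 10 with hk
  clear_value k
  interval_cases k <;> decide

-- ===== VERDICT (by name: the statement is the Claim_ definition above) =====
theorem multiCarrylessAdd_spec : Claim_equal_multiCarrylessAdd := by
  intro n _
  exact multiCarrylessAdd_key n
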